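-- pv_equiv track=rewrite | github.com/gcarrot/aoc2025 | day3/day3.py | max_two_digit
-- ===== SOURCE A (Python) =====
-- def max_two_digit(bank: str) -> int:
--     bank = bank.strip()
--     best_tens, best_ones = -1, -1
--     best_suffix = -1
--
--     for i in range(len(bank) - 2, -1, -1):
--         best_suffix = max(best_suffix, int(bank[i + 1]))
--         tens = int(bank[i])
--         ones = best_suffix
--         if (tens > best_tens) or (tens == best_tens and ones > best_ones):
--             best_tens, best_ones = tens, ones
--
--     return best_tens * 10 + best_ones
-- ===== SOURCE B (Python) =====
-- def max_two_digit(bank: str) -> int: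
--     s = bank.strip()
--     return max((int(s[i]) * 10 + int(s[j])
--                 for i in range(len(s)) for j in range(i + 1, len(s))),
--                default=-11)
-- ===== Notes on version B (the rewrite author's own statement) =====
-- stated objective: simpler
-- what changed: A's single right-to-left pass with a running suffix maximum and lexicographic (tens, ones) bookkeeping is replaced by a direct maximum over all ordered index pairs i<j of int(s[i])*10+int(s[j]), with default=-11 covering strings shorter than two characters exactly as A's -1/-1 sentinel does.
import Mathlib
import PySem

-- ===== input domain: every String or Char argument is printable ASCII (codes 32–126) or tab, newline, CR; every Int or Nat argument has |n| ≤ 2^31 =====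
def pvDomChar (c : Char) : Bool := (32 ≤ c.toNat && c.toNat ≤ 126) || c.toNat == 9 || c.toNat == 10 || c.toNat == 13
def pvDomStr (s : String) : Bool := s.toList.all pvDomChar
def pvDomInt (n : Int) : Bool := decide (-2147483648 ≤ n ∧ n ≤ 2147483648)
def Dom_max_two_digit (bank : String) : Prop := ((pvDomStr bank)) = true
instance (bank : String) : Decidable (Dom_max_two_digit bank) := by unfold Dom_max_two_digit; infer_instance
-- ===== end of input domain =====

-- B replaces A's right-to-left suffix-maximum pass by a direct maximum over all ordered
-- digit pairs i<j (simpler to read; not faster).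


-- ===== PORT A =====
-- int(<one-character string>); the ValueError case (ofChars? = none) is excluded by Pre_.
def pyIntChar (c : Char) : Int := (PySem.Int.ofChars? [c]).getD 0

-- literal transliteration of A: bank = bank.strip(); then the downward loop
-- for i in range(len(bank)-2, -1, -1) carrying (best_tens, best_ones, best_suffix).
def max_two_digit (bank : String) : Int :=
  let cs := (PySem.Str.strip bank).toList
  let n : Int := cs.length
  let st := (PySem.List.pyRange (n - 2) (-1) (-1)).foldl
    (fun (s : Int × Int × Int) i =>
      let bs' := max s.2.2 (pyIntChar (PySem.List.pyGetD cs (i + 1) ' '))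
      let tens := pyIntChar (PySem.List.pyGetD cs i ' ')
      if tens > s.1 ∨ (tens = s.1 ∧ bs' > s.2.1) then (tens, bs', bs') else (s.1, s.2.1, bs'))
    (-1, -1, -1)
  st.1 * 10 + st.2.1

-- ===== PORT B =====
-- literal transliteration of B: s = bank.strip();
-- max((int(s[i])*10 + int(s[j]) for i in range(len(s)) for j in range(i+1, len(s))), default=-11)
def max_two_digit_alt (bank : String) : Int :=
  let cs := (PySem.Str.strip bank).toList
  let n : Int := cs.length
  let cands := (PySem.List.pyRange 0 n 1).flatMap (fun i =>
    (PySem.List.pyRange (i + 1) n 1).map (fun j =>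
      pyIntChar (PySem.List.pyGetD cs i ' ') * 10 + pyIntChar (PySem.List.pyGetD cs j ' ')))
  (PySem.List.max? cands (fun y => y)).getD (-11)

-- ===== PRECONDITION & SPEC =====
-- Pre_ excludes exactly the inputs where Python A raises ValueError: a stripped string of
-- length ≥ 2 containing a non-digit character (int(bank[i]) raises there).
def Pre_max_two_digit (bank : String) : Prop :=
  (PySem.Str.strip bank).toList.length ≤ 1 ∨ (PySem.Str.strip bank).toList.all Char.isDigit = true
instance (bank : String) : Decidable (Pre_max_two_digit bank) := by unfold Pre_max_two_digit; infer_instance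
def pvWitness_max_two_digit : String := " 4271 "

def Spec_max_two_digit (bank : String) (out : Int) : Prop := out = max_two_digit_alt bank
instance (bank : String) (out : Int) : Decidable (Spec_max_two_digit bank out) := by unfold Spec_max_two_digit; infer_instance

-- ===== CLAIM (what is proved, stated in full; the proofs are below) =====
def Claim_equal_max_two_digit : Prop := ∀ (bank : String), Dom_max_two_digit bank → Pre_max_two_digit bank → Spec_max_two_digit bank (max_two_digit bank)

-- ===== LEMMAS AND PROOFS =====

theorem digit_cases (c : Char) (h : c.isDigit = true) : c ∈ ['0','1','2','3','4','5','6','7','8','9'] := by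
  have h48 : 48 ≤ c.val.toNat ∧ c.val.toNat ≤ 57 := by
    simp [Char.isDigit, UInt32.le_iff_toNat_le] at h
    exact h
  obtain ⟨h1, h2⟩ := h48
  interval_cases hn : c.val.toNat <;>
    simp [Char.ext_iff, ← UInt32.toNat_inj, hn]

theorem pyIntChar_range (c : Char) (h : c.isDigit = true) : 0 ≤ pyIntChar c ∧ pyIntChar c ≤ 9 := by
  have := digit_cases c h
  fin_cases this <;> constructor <;> decide

-- reference value: all candidates int(s[i])*10+int(s[j]) for i<j, as a bare list of values
def pairCands : List Int → List Int
  | [] => []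
  | d :: rest => rest.map (fun e => d * 10 + e) ++ pairCands rest

-- reference state recursion for A's loop, structurally on the digit list
def fRef : List Int → Int × Int × Int
  | [] => (-1, -1, -1)
  | [_] => (-1, -1, -1)
  | d :: e :: rest =>
    if d > (fRef (e :: rest)).1 ∨ (d = (fRef (e :: rest)).1 ∧ max (fRef (e :: rest)).2.2 e > (fRef (e :: rest)).2.1)
    then (d, max (fRef (e :: rest)).2.2 e, max (fRef (e :: rest)).2.2 e)
    else ((fRef (e :: rest)).1, (fRef (e :: rest)).2.1, max (fRef (e :: rest)).2.2 e)

theorem foldl_max_max (l : List Int) (a b : Int) :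
    l.foldl max (max a b) = max (l.foldl max a) b := by
  induction l generalizing a with
  | nil => rfl
  | cons x t ih =>
    simp only [List.foldl_cons]
    rw [max_right_comm, ih]

theorem foldl_max_map_add (l : List Int) (c a : Int) :
    (l.map (fun e => c + e)).foldl max (c + a) = c + l.foldl max a := by
  induction l generalizing a with
  | nil => rfl
  | cons x t ih =>
    simp only [List.map_cons, List.foldl_cons]
    rw [max_add_add_left, ih]

theorem foldl_max_absorb (l : List Int) (a b : Int) (h : a ≤ b) :
    l.foldl max b = max (l.foldl max a) b := by
  have := foldl_max_max l a b
  rw [max_eq_right h] at this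
  exact this

theorem flatMap_congr_mem {α β : Type} (l : List α) (f g : α → List β)
    (h : ∀ x ∈ l, f x = g x) : l.flatMap f = l.flatMap g := by
  induction l with
  | nil => rfl
  | cons x t ih =>
    simp only [List.flatMap_cons, h x (by simp), ih (fun y hy => h y (by simp [hy]))]

-- members of pairCands are nonnegative for digit lists
theorem pairCands_nonneg (ds : List Int) (h : ∀ d ∈ ds, 0 ≤ d ∧ d ≤ 9) :
    ∀ x ∈ pairCands ds, 0 ≤ x := by
  induction ds with
  | nil => simp [pairCands]
  | cons d rest ih =>
    intro x hx
    simp only [pairCands, List.mem_append, List.mem_map] at hx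
    rcases hx with ⟨e, he, rfl⟩ | hx
    · have h1 := h d (by simp)
      have h2 := h e (by simp [he])
      omega
    · exact ih (fun y hy => h y (by simp [hy])) x hx

-- python max(l, default=-11) as a fold, for nonnegative lists
theorem maxD_eq_foldl (l : List Int) (h : ∀ x ∈ l, 0 ≤ x) :
    (PySem.List.max? l (fun y => y)).getD (-11) = l.foldl max (-11) := by
  cases l with
  | nil => rfl
  | cons x t =>
    rw [PySem.List.max?_id_cons]
    have hx : max (-11 : Int) x = x := max_eq_right (by have := h x (by simp); omega)
    simp [hx]

-- value lemma: for digit lists, A's reference recursion computes the pair maximum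
theorem fRef_value (ds : List Int) (h : ∀ d ∈ ds, 0 ≤ d ∧ d ≤ 9) :
    (fRef ds).2.2 = ds.tail.foldl max (-1) ∧
    (fRef ds).2.1 ≤ (fRef ds).2.2 ∧
    (-1 ≤ (fRef ds).1 ∧ (fRef ds).1 ≤ 9 ∧ -1 ≤ (fRef ds).2.1 ∧ (fRef ds).2.1 ≤ 9 ∧
      -1 ≤ (fRef ds).2.2 ∧ (fRef ds).2.2 ≤ 9) ∧
    (fRef ds).1 * 10 + (fRef ds).2.1 = (pairCands ds).foldl max (-11) := by
  induction ds with
  | nil => simp [fRef, pairCands]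
  | cons d rest ih =>
    rcases rest with _ | ⟨e, rest2⟩
    · simp [fRef, pairCands]
    · obtain ⟨ih1, ih2, ⟨ihb1, ihb2, ihb3, ihb4, ihb5, ihb6⟩, ih4⟩ :=
        ih (fun y hy => h y (by simp [List.mem_cons] at hy ⊢; tauto))
      have hd := h d (by simp)
      have he := h e (by simp)
      have ih1' : (fRef (e :: rest2)).2.2 = List.foldl max (-1) rest2 := by simpa using ih1
      set M := max ((fRef (e :: rest2)).2.2) e with hM
      have hM1 : (fRef (e :: rest2)).2.2 ≤ M := le_max_left _ _
      have hM2 : e ≤ M := le_max_right _ _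
      have hM3 : M ≤ 9 := max_le ihb6 he.2
      have htail : List.foldl max (-1) (e :: rest2) = M := by
        simp only [List.foldl_cons]
        rw [foldl_max_max, ← ih1']
      have habs : List.foldl max e rest2 = M := by
        rw [foldl_max_absorb rest2 (-1) e (by omega), ← ih1']
      have hRHS : (pairCands (d :: e :: rest2)).foldl max (-11)
          = max ((fRef (e :: rest2)).1 * 10 + (fRef (e :: rest2)).2.1) (d * 10 + M) := by
        have h1 : pairCands (d :: e :: rest2)
            = ((e :: rest2).map (fun x => d * 10 + x)) ++ pairCands (e :: rest2) := rfl
        rw [h1, List.foldl_append]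
        have h2 : ((e :: rest2).map (fun x => d * 10 + x)).foldl max (-11) = d * 10 + M := by
          simp only [List.map_cons, List.foldl_cons]
          rw [max_eq_right (show (-11 : Int) ≤ d * 10 + e by omega),
              foldl_max_map_add rest2 (d * 10) e, habs]
        rw [h2, foldl_max_absorb (pairCands (e :: rest2)) (-11) (d * 10 + M) (by omega), ih4]
      have hG : fRef (d :: e :: rest2)
          = if d > (fRef (e :: rest2)).1 ∨
               (d = (fRef (e :: rest2)).1 ∧ M > (fRef (e :: rest2)).2.1)
            then (d, M, M)
            else ((fRef (e :: rest2)).1, (fRef (e :: rest2)).2.1, M) := by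
        rw [fRef]
      rw [hG]
      simp only [List.tail_cons]
      rw [htail]
      split_ifs with hc <;>
        refine ⟨rfl, ?_, ⟨?_, ?_, ?_, ?_, ?_, ?_⟩, ?_⟩ <;> dsimp only <;> omega

-- shifting a nonnegative pyGetD index past a cons
theorem pyGetD_cons_shift {α : Type} (c : α) (t : List α) (j : Int) (d : α)
    (h0 : 0 ≤ j) (h1 : j < (t.length : Int)) :
    PySem.List.pyGetD (c :: t) (j + 1) d = PySem.List.pyGetD t j d := by
  rw [PySem.List.pyGetD_eq_getElem _ d (by omega) (by simp; omega),
      PySem.List.pyGetD_eq_getElem _ d h0 h1]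
  have hj : (j + 1).toNat = j.toNat + 1 := by omega
  simp [hj]

-- bridge A: the pyRange fold equals the reference recursion on the mapped digit list
theorem loopA_eq (cs : List Char) :
    ((PySem.List.pyRange ((cs.length : Int) - 2) (-1) (-1)).foldl
      (fun (s : Int × Int × Int) i =>
        let bs' := max s.2.2 (pyIntChar (PySem.List.pyGetD cs (i + 1) ' '))
        let tens := pyIntChar (PySem.List.pyGetD cs i ' ')
        if tens > s.1 ∨ (tens = s.1 ∧ bs' > s.2.1) then (tens, bs', bs') else (s.1, s.2.1, bs'))
      (-1, -1, -1)) = fRef (cs.map pyIntChar) := by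
  induction cs with
  | nil => rw [PySem.List.pyRange_neg_one_eq_nil (by simp)]; rfl
  | cons c tl ih =>
    rcases tl with _ | ⟨c2, tl2⟩
    · rw [PySem.List.pyRange_neg_one_eq_nil (by simp)]; rfl
    · -- cs = c :: c2 :: tl2, length ≥ 2
      have hn : (2 : Int) ≤ ((c :: c2 :: tl2).length : Int) := by simp; omega
      have hsplit : PySem.List.pyRange (((c :: c2 :: tl2).length : Int) - 2) (-1) (-1)
          = PySem.List.pyRange (((c :: c2 :: tl2).length : Int) - 2) 0 (-1) ++ [0] := by
        rw [PySem.List.pyRange_neg_one_eq_reverse, PySem.List.pyRange_neg_one_eq_reverse,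
            PySem.List.pyRange_one_cons (by omega : (-1 : Int) + 1 < ((c :: c2 :: tl2).length : Int) - 2 + 1)]
        simp
      rw [hsplit, List.foldl_append]
      -- middle part: reindex to the tail list
      have hmid : ((PySem.List.pyRange (((c :: c2 :: tl2).length : Int) - 2) 0 (-1)).foldl
          (fun (s : Int × Int × Int) i =>
            let bs' := max s.2.2 (pyIntChar (PySem.List.pyGetD (c :: c2 :: tl2) (i + 1) ' '))
            let tens := pyIntChar (PySem.List.pyGetD (c :: c2 :: tl2) i ' ')
            if tens > s.1 ∨ (tens = s.1 ∧ bs' > s.2.1) then (tens, bs', bs') else (s.1, s.2.1, bs'))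
          (-1, -1, -1))
          = ((PySem.List.pyRange (((c2 :: tl2).length : Int) - 2) (-1) (-1)).foldl
          (fun (s : Int × Int × Int) i =>
            let bs' := max s.2.2 (pyIntChar (PySem.List.pyGetD (c2 :: tl2) (i + 1) ' '))
            let tens := pyIntChar (PySem.List.pyGetD (c2 :: tl2) i ' ')
            if tens > s.1 ∨ (tens = s.1 ∧ bs' > s.2.1) then (tens, bs', bs') else (s.1, s.2.1, bs'))
          (-1, -1, -1)) := by
        rw [PySem.List.pyRange_neg_one, PySem.List.pyRange_neg_one, List.foldl_map, List.foldl_map]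
        have hlen : ((((c :: c2 :: tl2).length : Int) - 2) - 0).toNat
            = ((((c2 :: tl2).length : Int) - 2) - (-1)).toNat := by simp; omega
        rw [hlen]
        apply PySem.List.foldl_congr_mem
        intro acc k hk
        have hkk : (k : Int) < (tl2.length : Int) := by
          simp at hk
          omega
        have e1 : PySem.List.pyGetD (c :: c2 :: tl2) ((((c :: c2 :: tl2).length : Int) - 2 - k) + 1) ' '
            = PySem.List.pyGetD (c2 :: tl2) ((((c2 :: tl2).length : Int) - 2 - k) + 1) ' ' := by
          have harg : (((c :: c2 :: tl2).length : Int) - 2 - k) + 1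
              = (((((c2 :: tl2).length : Int) - 2 - k) + 1)) + 1 := by simp; omega
          rw [harg, pyGetD_cons_shift c (c2 :: tl2) _ ' ' (by simp; omega) (by simp; omega)]
        have e2 : PySem.List.pyGetD (c :: c2 :: tl2) (((c :: c2 :: tl2).length : Int) - 2 - k) ' '
            = PySem.List.pyGetD (c2 :: tl2) (((c2 :: tl2).length : Int) - 2 - k) ' ' := by
          have harg : ((c :: c2 :: tl2).length : Int) - 2 - k
              = (((c2 :: tl2).length : Int) - 2 - k) + 1 := by simp; omega
          rw [harg, pyGetD_cons_shift c (c2 :: tl2) _ ' ' (by simp; omega) (by simp; omega)]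
        simp only [e1, e2]
      rw [hmid, ih]
      -- last step at i = 0
      have g1 : PySem.List.pyGetD (c :: c2 :: tl2) (0 + 1) ' ' = c2 := by
        rw [PySem.List.pyGetD_eq_getElem _ ' ' (by omega) (by simp)]
        rfl
      have g0 : PySem.List.pyGetD (c :: c2 :: tl2) 0 ' ' = c := PySem.List.pyGetD_zero_cons _ _ _
      simp only [List.foldl_cons, List.foldl_nil, List.map_cons, g1, g0]
      rw [fRef]

-- flatMap version of (l.map f).flatMap g = l.flatMap (g ∘ f)
theorem flatMap_map_comp {α β γ : Type} (l : List α) (f : α → β) (g : β → List γ) :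
    (l.map f).flatMap g = l.flatMap (fun x => g (f x)) := by
  induction l with
  | nil => rfl
  | cons x t ih => simp only [List.map_cons, List.flatMap_cons, ih]

-- the inner comprehension as a map over the dropped suffix
theorem innerB_eq (cs : List Char) (i : Int) (h0 : 0 ≤ i) :
    ((PySem.List.pyRange (i + 1) (cs.length : Int) 1).map (fun j =>
      pyIntChar (PySem.List.pyGetD cs i ' ') * 10 + pyIntChar (PySem.List.pyGetD cs j ' ')))
    = (cs.drop (i + 1).toNat).map (fun x =>
        pyIntChar (PySem.List.pyGetD cs i ' ') * 10 + pyIntChar x) := by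
  rw [← PySem.List.map_pyGetD_pyRange' cs ' ' (by omega : (0 : Int) ≤ i + 1), List.map_map]
  rfl

-- bridge B: the pair comprehension equals pairCands of the mapped digit list
theorem candsB_eq (cs : List Char) :
    ((PySem.List.pyRange 0 (cs.length : Int) 1).flatMap (fun i =>
      (PySem.List.pyRange (i + 1) (cs.length : Int) 1).map (fun j =>
        pyIntChar (PySem.List.pyGetD cs i ' ') * 10 + pyIntChar (PySem.List.pyGetD cs j ' ')))) =
    pairCands (cs.map pyIntChar) := by
  induction cs with
  | nil => rfl
  | cons c tl ih =>
    rw [PySem.List.pyRange_one_cons (by simp : (0 : Int) < ((c :: tl).length : Int))]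
    simp only [List.flatMap_cons]
    have hhead : ((PySem.List.pyRange (0 + 1) ((c :: tl).length : Int) 1).map (fun j =>
        pyIntChar (PySem.List.pyGetD (c :: tl) 0 ' ') * 10 + pyIntChar (PySem.List.pyGetD (c :: tl) j ' ')))
        = (tl.map pyIntChar).map (fun e => pyIntChar c * 10 + e) := by
      rw [innerB_eq (c :: tl) 0 le_rfl, PySem.List.pyGetD_zero_cons]
      simp [List.map_map]
    have htail : ((PySem.List.pyRange (0 + 1) ((c :: tl).length : Int) 1).flatMap (fun i =>
        (PySem.List.pyRange (i + 1) ((c :: tl).length : Int) 1).map (fun j =>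
          pyIntChar (PySem.List.pyGetD (c :: tl) i ' ') * 10 + pyIntChar (PySem.List.pyGetD (c :: tl) j ' '))))
        = ((PySem.List.pyRange 0 ((tl.length : Int)) 1).flatMap (fun i =>
        (PySem.List.pyRange (i + 1) ((tl.length : Int)) 1).map (fun j =>
          pyIntChar (PySem.List.pyGetD tl i ' ') * 10 + pyIntChar (PySem.List.pyGetD tl j ' ')))) := by
      rw [PySem.List.pyRange_one, PySem.List.pyRange_one, flatMap_map_comp, flatMap_map_comp]
      have hlen : (((c :: tl).length : Int) - (0 + 1)).toNat = ((tl.length : Int) - 0).toNat := by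
        simp
      rw [hlen]
      apply flatMap_congr_mem
      intro k hk
      have hkk : (k : Int) < (tl.length : Int) := by
        simp at hk
        omega
      rw [innerB_eq (c :: tl) (0 + 1 + k) (by omega), innerB_eq tl (0 + k) (by omega)]
      have harg : (0 : Int) + 1 + (k : Int) = ((0 : Int) + (k : Int)) + 1 := by omega
      rw [harg, pyGetD_cons_shift c tl ((0 : Int) + (k : Int)) ' ' (by omega) (by omega)]
      have hdrop : ((((0 : Int) + (k : Int)) + 1) + 1).toNat = (((0 : Int) + (k : Int)) + 1).toNat + 1 := by
        omega
      rw [hdrop, List.drop_succ_cons]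
    rw [hhead, htail, ih]
    simp [pairCands]

-- ===== VERDICT (by name: the statement is the Claim_ definition above) =====
theorem max_two_digit_spec : Claim_equal_max_two_digit := by
  intro bank _ hpre
  unfold Spec_max_two_digit max_two_digit max_two_digit_alt
  simp only
  rw [loopA_eq, candsB_eq]
  rcases hpre with hshort | hdig
  · rcases hcs : (PySem.Str.strip bank).toList with _ | ⟨c, _ | ⟨c2, rest⟩⟩
    · rfl
    · rfl
    · rw [hcs] at hshort; simp at hshort
  · have h9 : ∀ d ∈ (PySem.Str.strip bank).toList.map pyIntChar, 0 ≤ d ∧ d ≤ 9 := by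
      intro d hd
      simp only [List.mem_map] at hd
      obtain ⟨ch, hch, rfl⟩ := hd
      exact pyIntChar_range ch (by simp only [List.all_eq_true] at hdig; exact hdig ch hch)
    rw [maxD_eq_foldl _ (pairCands_nonneg _ h9)]
    exact (fRef_value _ h9).2.2.2
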